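-- pv_equiv track=rewrite | github.com/dabelt-msft/algorithms_datastructures_python | string_exploration.py | is_unique_optimized_for_time
-- ===== SOURCE A (Python) =====
-- def is_unique_optimized_for_time(text):
--     items = set()
--     for chr in text:
--         if chr in items:
--             return False
--         else:
--             items.add(chr)
--     return True
-- ===== SOURCE B (Python) =====
-- def is_unique_optimized_for_time(text):
--     s = sorted(text)
--     return all(a != b for a, b in zip(s, s[1:]))
-- ===== Notes on version B (the rewrite author's own statement) =====
-- stated objective: alternative
-- what changed: Replaces the hash-set membership scan by a sort followed by an adjacent-pair comparison: duplicates in a sorted sequence are adjacent, so no set is built at all.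
import Mathlib
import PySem

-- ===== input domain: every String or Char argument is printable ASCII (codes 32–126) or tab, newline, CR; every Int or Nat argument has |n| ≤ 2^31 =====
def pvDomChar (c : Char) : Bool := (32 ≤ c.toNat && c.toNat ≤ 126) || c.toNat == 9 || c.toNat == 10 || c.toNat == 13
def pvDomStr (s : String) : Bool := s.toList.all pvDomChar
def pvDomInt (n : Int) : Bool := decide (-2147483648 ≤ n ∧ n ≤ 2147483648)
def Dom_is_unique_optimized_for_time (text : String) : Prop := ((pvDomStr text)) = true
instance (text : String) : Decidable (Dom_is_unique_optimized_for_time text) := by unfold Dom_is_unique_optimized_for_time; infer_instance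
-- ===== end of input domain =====

-- B sorts the characters and checks adjacent pairs instead of scanning with a hash set ('alternative').

-- ===== PORT A =====
-- loop of A: for chr in text: early-return False on a repeat, else add to the set
def pvLoopA : List Char → PySem.Set Char → Bool
  | [], _ => true
  | c :: rest, items =>
      if PySem.Set.contains items c then false
      else pvLoopA rest (PySem.Set.add items c)

def is_unique_optimized_for_time (text : String) : Bool :=
  pvLoopA text.toList PySem.Set.empty

-- ===== PORT B =====
-- B: s = sorted(text); all(a != b for a, b in zip(s, s[1:]))
def is_unique_optimized_for_time_alt (text : String) : Bool :=
  let s := PySem.List.sorted text.toList (fun c => c) false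
  (s.zip (PySem.List.slice s (some 1) none)).all (fun p => !(p.1 == p.2))

-- ===== PRECONDITION & SPEC =====
def Spec_is_unique_optimized_for_time (text : String) (out : Bool) : Prop := out = is_unique_optimized_for_time_alt text
instance (text : String) (out : Bool) : Decidable (Spec_is_unique_optimized_for_time text out) := by unfold Spec_is_unique_optimized_for_time; infer_instance

-- ===== CLAIM (what is proved, stated in full; the proofs are below) =====
def Claim_equal_is_unique_optimized_for_time : Prop := ∀ (text : String), Dom_is_unique_optimized_for_time text → Spec_is_unique_optimized_for_time text (is_unique_optimized_for_time text)

-- ===== LEMMAS AND PROOFS =====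

-- A's early-exit loop returns true iff the remaining chars are pairwise distinct and disjoint from the set so far
lemma pv_loopA_iff (l : List Char) (acc : PySem.Set Char) :
    pvLoopA l acc = true ↔ l.Nodup ∧ ∀ c ∈ l, c ∉ acc := by
  induction l generalizing acc with
  | nil => simp [pvLoopA]
  | cons c rest ih =>
      by_cases hc : PySem.Set.contains acc c = true
      · have hmem : c ∈ acc := by simpa [PySem.Set.contains] using hc
        simp only [pvLoopA, if_pos hc]
        constructor
        · intro h; exact absurd h (by simp)
        · rintro ⟨_, hall⟩; exact absurd hmem (hall c (by simp))
      · have hnm : c ∉ acc := by simpa [PySem.Set.contains] using hc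
        have hadd : PySem.Set.add acc c = acc ++ [c] := by
          unfold PySem.Set.add PySem.Set.contains
          simp [hnm]
        simp only [pvLoopA, if_neg hc, ih, hadd, List.nodup_cons, List.mem_cons]
        constructor
        · rintro ⟨hnd, hall⟩
          refine ⟨⟨fun hcm => ?_, hnd⟩, ?_⟩
          · exact absurd (by simp : c ∈ acc ++ [c]) (by simpa using hall c hcm)
          · rintro d (rfl | hd)
            · exact hnm
            · exact fun hmem' => (hall d hd) (by simp [hmem'])
        · rintro ⟨⟨hcr, hnd⟩, hall⟩
          refine ⟨hnd, fun d hd hmem' => ?_⟩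
          rcases List.mem_append.1 hmem' with h | h
          · exact hall d (Or.inr hd) h
          · simp at h; exact hcr (h ▸ hd)

-- the zip-with-tail all-≠ test is exactly adjacent distinctness (IsChain ≠)
lemma pv_zipTail_iff (s : List Char) :
    ((s.zip s.tail).all (fun p => !(p.1 == p.2)) = true) ↔ List.IsChain (· ≠ ·) s := by
  induction s with
  | nil => simp
  | cons a t ih =>
      cases t with
      | nil => simp
      | cons b u =>
          simp only [List.tail_cons, List.zip_cons_cons, List.all_cons, List.isChain_cons_cons,
            Bool.and_eq_true, Bool.not_eq_true', beq_eq_false_iff_ne]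
          exact and_congr Iff.rfl (by simpa using ih)

-- on a (≤)-sorted list, adjacent distinctness is exactly Nodup
lemma pv_sorted_chain_ne_iff (s : List Char) (hs : s.Pairwise (· ≤ ·)) :
    List.IsChain (· ≠ ·) s ↔ s.Nodup := by
  constructor
  · intro hch
    have hlt : List.IsChain (· < ·) s := by
      have hle : List.IsChain (· ≤ ·) s := hs.isChain
      clear hs
      induction s with
      | nil => exact .nil
      | cons a t ihs =>
          cases t with
          | nil => simp
          | cons b u =>
              rw [List.isChain_cons_cons] at hch hle ⊢
              exact ⟨lt_of_le_of_ne hle.1 hch.1, ihs hch.2 hle.2⟩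
    exact (List.isChain_iff_pairwise.1 hlt).imp ne_of_lt
  · intro hnd
    exact hnd.isChain

-- A = decide Nodup of the character list
lemma pv_A_eq (text : String) :
    is_unique_optimized_for_time text = decide text.toList.Nodup := by
  unfold is_unique_optimized_for_time
  cases h : pvLoopA text.toList PySem.Set.empty with
  | false =>
      have hn : ¬ (text.toList.Nodup ∧ ∀ c ∈ text.toList, c ∉ PySem.Set.empty) := by
        rw [← pv_loopA_iff, h]; simp
      have hnd : ¬ text.toList.Nodup := fun hnd =>
        hn ⟨hnd, fun c _ hc => by simp [PySem.Set.empty] at hc⟩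
      symm; simpa using hnd
  | true =>
      have := (pv_loopA_iff text.toList PySem.Set.empty).1 h
      symm; simpa using this.1

-- B = decide Nodup of the character list
lemma pv_B_eq (text : String) :
    is_unique_optimized_for_time_alt text = decide text.toList.Nodup := by
  show ((PySem.List.sorted text.toList (fun c => c) false).zip
      (PySem.List.slice (PySem.List.sorted text.toList (fun c => c) false) (some 1) none)).all
      (fun p => !(p.1 == p.2)) = decide text.toList.Nodup
  rw [PySem.List.slice_from_one]
  have hperm : (PySem.List.sorted text.toList (fun c => c) false).Perm text.toList :=
    PySem.List.sorted_perm _ _ _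
  have hpw : (PySem.List.sorted text.toList (fun c => c) false).Pairwise (· ≤ ·) := by
    simpa using PySem.List.sorted_pairwise text.toList (fun c => c)
  have hiff := (pv_zipTail_iff (PySem.List.sorted text.toList (fun c => c) false)).trans
    ((pv_sorted_chain_ne_iff _ hpw).trans hperm.nodup_iff)
  cases h : ((PySem.List.sorted text.toList (fun c => c) false).zip
      (PySem.List.sorted text.toList (fun c => c) false).tail).all (fun p => !(p.1 == p.2)) with
  | false =>
      have : ¬ text.toList.Nodup := by rw [← hiff]; simp [h]
      simp [this]
  | true => simp [hiff.1 h]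

-- ===== VERDICT (by name: the statement is the Claim_ definition above) =====
theorem is_unique_optimized_for_time_spec : Claim_equal_is_unique_optimized_for_time := by
  intro text _
  unfold Spec_is_unique_optimized_for_time
  rw [pv_A_eq, pv_B_eq]
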